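-- pv_equiv track=rewrite | github.com/BHARATHMUTHYALA/Interesting-Computer-Networks | WEEK 2/character_stuffing_normal.py | character_stuffing
-- ===== SOURCE A (Python) =====
-- def character_stuffing(data):
--     flag = '10101010'
--     escape_character = '11100'
--     stuffed_data = ''
--     count_ones =  0
--
--     for bit in data:
--         if bit == '1':
--             count_ones += 1
--         else:
--             count_ones = 0
--         stuffed_data+=bit
--         if count_ones == 5:
--             stuffed_data += escape_character
--             count_ones = 0
--
--     stuffed_data = flag +stuffed_data + flag
--     return stuffed_data
-- ===== SOURCE B (Python) =====
-- def character_stuffing(data):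
--     flag = '10101010'
--     escape_character = '11100'
--     # str.replace scans left to right, non-overlapping, and never rescans the
--     # inserted text, so every maximal run of L ones gets exactly L // 5 escapes,
--     # the same as the reset-counter loop.
--     return flag + data.replace('11111', '11111' + escape_character) + flag
-- ===== Notes on version B (the rewrite author's own statement) =====
-- stated objective: idiomatic
-- what changed: Replaces the per-character counter loop with a single str.replace('11111', '11111'+escape), which performs the same left-to-right non-overlapping substitution in one library call.
import Mathlib
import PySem

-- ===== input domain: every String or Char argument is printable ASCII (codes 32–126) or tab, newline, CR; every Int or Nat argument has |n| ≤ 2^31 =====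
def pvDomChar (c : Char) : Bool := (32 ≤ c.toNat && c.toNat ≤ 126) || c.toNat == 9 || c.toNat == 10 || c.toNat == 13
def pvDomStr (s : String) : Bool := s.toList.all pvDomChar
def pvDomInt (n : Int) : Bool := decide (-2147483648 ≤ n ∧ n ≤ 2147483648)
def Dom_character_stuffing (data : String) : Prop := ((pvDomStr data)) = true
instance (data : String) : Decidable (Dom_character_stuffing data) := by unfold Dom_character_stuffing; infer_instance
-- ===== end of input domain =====

-- B replaces A's per-character counter loop by one str.replace call performing the same
-- left-to-right non-overlapping substitution; proved to return the same string.


-- ===== PORT A =====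
-- A's loop: count consecutive '1's, append each bit, insert escape '11100' after five ones.
def aLoop : List Char → Nat → List Char → List Char
  | [], _, stuffed => stuffed
  | bit :: rest, countOnes, stuffed =>
    let countOnes' := if bit = '1' then countOnes + 1 else 0
    let stuffed' := stuffed ++ [bit]
    if countOnes' = 5 then aLoop rest 0 (stuffed' ++ ['1','1','1','0','0'])
    else aLoop rest countOnes' stuffed'

def character_stuffing (data : String) : String :=
  String.ofList (('1'::'0'::'1'::'0'::'1'::'0'::'1'::'0'::[]) ++ aLoop data.toList 0 [] ++ ('1'::'0'::'1'::'0'::'1'::'0'::'1'::'0'::[]))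

-- ===== PORT B =====
def character_stuffing_alt (data : String) : String :=
  "10101010" ++ PySem.Str.replace data "11111" ("11111" ++ "11100") ++ "10101010"

-- ===== PRECONDITION & SPEC =====
def Spec_character_stuffing (data : String) (out : String) : Prop := out = character_stuffing_alt data
instance (data : String) (out : String) : Decidable (Spec_character_stuffing data out) := by unfold Spec_character_stuffing; infer_instance

-- ===== CLAIM (what is proved, stated in full; the proofs are below) =====
def Claim_equal_character_stuffing : Prop := ∀ (data : String), Dom_character_stuffing data → Spec_character_stuffing data (character_stuffing data)

-- ===== LEMMAS AND PROOFS =====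

-- clean intermediate scan: both the A-loop and replace reduce to this
def bScan : List Char → List Char
  | [] => []
  | c :: t =>
    if (['1','1','1','1','1'] : List Char).isPrefixOf (c :: t) then
      ['1','1','1','1','1','1','1','1','0','0'] ++ bScan (t.drop 4)
    else c :: bScan t
termination_by l => l.length
decreasing_by
  all_goals simp [List.length_drop]

lemma bScan_nil : bScan [] = [] := by simp only [bScan]

lemma bScan_cons_pos (c : Char) (t : List Char)
    (h : (['1','1','1','1','1'] : List Char).isPrefixOf (c :: t) = true) :
    bScan (c :: t) = ['1','1','1','1','1','1','1','1','0','0'] ++ bScan (t.drop 4) := by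
  simp only [bScan]; rw [if_pos h]

lemma bScan_cons_neg (c : Char) (t : List Char)
    (h : (['1','1','1','1','1'] : List Char).isPrefixOf (c :: t) = false) :
    bScan (c :: t) = c :: bScan t := by
  simp only [bScan]; rw [if_neg (by simp [h])]

lemma isPrefixOf_one_cons (t : List Char) :
    (['1','1','1','1','1'] : List Char).isPrefixOf ('1' :: t)
      = (['1','1','1','1'] : List Char).isPrefixOf t := by
  simp [List.isPrefixOf]

lemma isPrefixOf_ne_cons (a : Char) (t : List Char) (ha : a ≠ '1') :
    (['1','1','1','1','1'] : List Char).isPrefixOf (a :: t) = false := by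
  simp only [List.isPrefixOf, Bool.and_eq_false_iff, beq_eq_false_iff_ne, ne_eq]
  exact Or.inl (fun h => ha h.symm)

lemma replicate_prefix_mono (m n : Nat) (a : Char) (h : m ≤ n) :
    List.replicate m a <+: List.replicate n a :=
  ⟨List.replicate (n - m) a, by rw [← List.replicate_add]; congr 1; omega⟩

-- A's loop equals bScan; the extra hypotheses describe exactly the states A can be in:
-- a nonzero counter c means the current run cannot reach five more ones minus c.
lemma aLoop_eq_bScan : ∀ (n : Nat) (l : List Char), l.length ≤ n →
    ∀ (c : Nat) (acc : List Char), c < 5 →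
    (c ≠ 0 → ¬ (List.replicate (5 - c) '1' <+: l)) →
    aLoop l c acc = acc ++ bScan l := by
  intro n
  induction n with
  | zero =>
    intro l hl c acc _ _
    have : l = [] := by cases l with
      | nil => rfl
      | cons a t => simp at hl
    subst this; simp [aLoop, bScan_nil]
  | succ n ih =>
    intro l hl c acc hc5 hc
    match l with
    | [] => simp [aLoop, bScan_nil]
    | a :: t =>
      by_cases ha : a = '1'
      · subst ha
        by_cases hcz : c = 0
        · subst hcz
          by_cases hp : (['1','1','1','1'] : List Char).isPrefixOf t
          · -- five ones ahead: both insert the escape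
            obtain ⟨r, rfl⟩ := List.isPrefixOf_iff_prefix.mp hp
            have hr : r.length ≤ n := by simp at hl; omega
            rw [bScan_cons_pos _ _ (by rw [isPrefixOf_one_cons]; exact hp)]
            have h5 : aLoop ('1' :: ((['1','1','1','1'] : List Char) ++ r)) 0 acc
                = aLoop r 0 (acc ++ ['1','1','1','1','1','1','1','1','0','0']) := by
              simp [aLoop]
            rw [h5, ih r hr 0 _ (by omega) (by simp),
              (by simp : List.drop 4 ((['1','1','1','1'] : List Char) ++ r) = r)]
            simp
          · -- fewer than five ones: counter goes to 1
            have hb : (['1','1','1','1','1'] : List Char).isPrefixOf ('1' :: t) = false := by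
              rw [isPrefixOf_one_cons]; exact Bool.eq_false_iff.mpr hp
            rw [bScan_cons_neg _ _ hb]
            simp only [aLoop, reduceIte, if_neg (by omega : ¬(0 + 1 = 5))]
            rw [ih t (by simp at hl; omega) 1 _ (by omega)
              (fun _ h4 => hp (List.isPrefixOf_iff_prefix.mpr h4))]
            simp
        · -- mid-run: c ones already seen, run too short to match here
          have hlt : ¬ (List.replicate (5 - c) '1' <+: ('1' :: t)) := hc hcz
          have hc1 : c + 1 ≠ 5 := by
            intro h5
            exact hlt (by
              have : 5 - c = 1 := by omega
              rw [this]; exact ⟨t, rfl⟩)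
          have ht : ¬ (List.replicate (5 - (c + 1)) '1' <+: t) := by
            intro h
            apply hlt
            have : (5 - c) = (5 - (c+1)) + 1 := by omega
            rw [this, List.replicate_succ]
            exact List.cons_prefix_cons.mpr ⟨rfl, h⟩
          have ht4 : ¬ (List.replicate 4 '1' <+: t) := by
            intro h4
            exact ht ((replicate_prefix_mono _ 4 '1' (by omega)).trans h4)
          have hb : (['1','1','1','1','1'] : List Char).isPrefixOf ('1' :: t) = false := by
            rw [isPrefixOf_one_cons]
            exact Bool.eq_false_iff.mpr (fun h => ht4 (List.isPrefixOf_iff_prefix.mp h))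
          rw [bScan_cons_neg _ _ hb]
          simp only [aLoop, reduceIte, if_neg hc1]
          rw [ih t (by simp at hl; omega) (c+1) _ (by omega) (fun _ => ht)]
          simp
      · -- a non-'1' resets the counter and never starts a match
        rw [bScan_cons_neg _ _ (isPrefixOf_ne_cons a t ha)]
        simp only [aLoop, if_neg ha, if_neg (by omega : ¬(0:Nat) = 5)]
        rw [ih t (by simp at hl; omega) 0 _ (by omega) (by simp)]
        simp

-- the replace scanner equals bScan (fuel always dominates the remaining length)
lemma go_eq_bScan : ∀ (fuel : Nat) (l : List Char), l.length ≤ fuel →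
    ∀ acc, PySem.Chars.replace.go ['1','1','1','1','1'] ['1','1','1','1','1','1','1','1','0','0'] fuel l acc
      = acc.reverse ++ bScan l := by
  intro fuel
  induction fuel with
  | zero =>
    intro l hl acc
    have : l = [] := by cases l with
      | nil => rfl
      | cons a t => simp at hl
    subst this
    simp [PySem.Chars.replace.go, bScan_nil]
  | succ n ih =>
    intro l hl acc
    match l with
    | [] => simp [PySem.Chars.replace.go, bScan_nil]
    | c :: t =>
      rw [PySem.Chars.replace.go]
      by_cases h : (['1','1','1','1','1'] : List Char).isPrefixOf (c :: t)
      · rw [if_pos h, bScan_cons_pos _ _ h]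
        have hdrop : List.drop 5 (c :: t) = t.drop 4 := by simp
        rw [show (['1','1','1','1','1'] : List Char).length = 5 from rfl, hdrop]
        rw [ih (t.drop 4) (by simp at hl ⊢; omega)]
        simp
      · rw [if_neg h, bScan_cons_neg _ _ (Bool.eq_false_iff.mpr h)]
        rw [ih t (by simp at hl; omega)]
        simp

lemma replace_eq_bScan (l : List Char) :
    PySem.Chars.replace l ['1','1','1','1','1'] ['1','1','1','1','1','1','1','1','0','0'] = bScan l := by
  rw [PySem.Chars.replace]
  rw [if_neg (by simp)]
  rw [go_eq_bScan l.length l le_rfl []]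
  simp

-- ===== VERDICT (by name: the statement is the Claim_ definition above) =====
theorem character_stuffing_spec : Claim_equal_character_stuffing := by
  intro data _
  unfold Spec_character_stuffing character_stuffing character_stuffing_alt
  apply String.toList_inj.mp
  rw [aLoop_eq_bScan data.toList.length data.toList le_rfl 0 [] (by omega) (by simp)]
  simp only [String.toList_ofList, String.toList_append, PySem.Str.toList_replace]
  rw [show ("11111" : String).toList = ['1','1','1','1','1'] by decide,
    show ("11100" : String).toList = ['1','1','1','0','0'] by decide,
    show ("10101010" : String).toList = ['1','0','1','0','1','0','1','0'] by decide]
  simp only [List.cons_append, List.nil_append]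
  rw [replace_eq_bScan]
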